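-- pv_equiv track=rewrite | github.com/stiffitydoodah/slp-lab2 | fwd-back.py | listofpostags
-- ===== SOURCE A (Python) =====
-- def listofpostags(training):
-- 	tagcount = {}
--
-- 	tagcount['start'] = 0
-- 	tagcount['stop'] = 0
--
-- 	for element in training:
-- 		for pairs in element:
-- 			tagcount[pairs[1]] = 0
--
-- 	for element in training:
-- 		tagcount['start'] = tagcount['start'] + 1
-- 		tagcount['stop'] = tagcount['stop'] + 1
-- 		for pairs in element:
-- 			tagcount[pairs[1]] = tagcount[pairs[1]] + 1
--
-- 	return tagcount
-- ===== SOURCE B (Python) =====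
-- def listofpostags(training):
--     n = len(training)
--     tags = [pairs[1] for element in training for pairs in element]
--     tagcount = {'start': n, 'stop': n}
--     for tag in dict.fromkeys(tags):
--         tagcount[tag] = tagcount.get(tag, 0) + tags.count(tag)
--     return tagcount
-- ===== Notes on version B (the rewrite author's own statement) =====
-- stated objective: alternative
-- what changed: B replaces A's incremental token-by-token counting dict (an initialization pass plus a counting pass bumping each tag per token) by dedup-then-count: start/stop come from len(training) in closed form, the distinct tags are taken once in first-appearance order, and each distinct tag's total is computed by one tags.count call.
import Mathlib
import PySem

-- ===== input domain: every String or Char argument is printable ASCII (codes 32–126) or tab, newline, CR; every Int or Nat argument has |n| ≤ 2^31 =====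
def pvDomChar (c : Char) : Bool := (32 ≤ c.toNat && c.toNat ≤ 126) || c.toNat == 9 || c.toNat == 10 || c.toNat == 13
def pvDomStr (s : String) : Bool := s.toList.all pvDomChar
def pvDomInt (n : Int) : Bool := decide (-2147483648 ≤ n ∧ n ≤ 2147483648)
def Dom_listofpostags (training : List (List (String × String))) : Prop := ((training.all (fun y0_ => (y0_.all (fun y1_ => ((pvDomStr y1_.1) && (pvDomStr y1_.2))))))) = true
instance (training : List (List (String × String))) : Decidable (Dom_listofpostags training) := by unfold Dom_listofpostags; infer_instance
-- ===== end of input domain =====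

-- B replaces A's incremental counting dict (init pass + per-token increments) by
-- dedup-then-count: start/stop = len(training), distinct tags in first-appearance
-- order, each counted once with tags.count — a different strategy, same result.

-- ===== PORT A =====
def aInitStep (d : PySem.Dict String Int) (el : List (String × String)) : PySem.Dict String Int :=
  el.foldl (fun d p => d.insert p.2 0) d

def aCountStep (d : PySem.Dict String Int) (el : List (String × String)) : PySem.Dict String Int :=
  let d1 := d.insert "start" (d.getD "start" 0 + 1)
  let d2 := d1.insert "stop" (d1.getD "stop" 0 + 1)
  el.foldl (fun d p => d.insert p.2 (d.getD p.2 0 + 1)) d2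

def listofpostags (training : List (List (String × String))) : List (String × Int) :=
  let t0 := ((PySem.Dict.empty : PySem.Dict String Int).insert "start" 0).insert "stop" 0
  let t1 := training.foldl aInitStep t0
  let t2 := training.foldl aCountStep t1
  t2.items

-- ===== PORT B =====
def listofpostags_alt (training : List (List (String × String))) : List (String × Int) :=
  let n : Int := training.length
  let tags := training.flatMap (fun el => el.map (fun p => p.2))
  ((PySem.List.dedup tags).foldl
      (fun d t => d.insert t (d.getD t 0 + (tags.count t : Int)))
      (PySem.Dict.ofList [("start", n), ("stop", n)])).items

-- ===== PRECONDITION & SPEC =====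
def Spec_listofpostags (training : List (List (String × String))) (out : List (String × Int)) : Prop := out = listofpostags_alt training
instance (training : List (List (String × String))) (out : List (String × Int)) : Decidable (Spec_listofpostags training out) := by unfold Spec_listofpostags; infer_instance

-- ===== CLAIM =====
def Claim_equal_listofpostags : Prop := ∀ (training : List (List (String × String))), Dom_listofpostags training → Spec_listofpostags training (listofpostags training)

-- ===== LEMMAS AND PROOFS =====

def pvTags (training : List (List (String × String))) : List String :=
  training.flatMap (fun el => el.map (fun p => p.2))

theorem keys_insert_add (d : PySem.Dict String Int) (k : String) (v : Int) :
    (d.insert k v).keys = PySem.Set.add d.keys k := by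
  by_cases h : d.contains k = true
  · rw [PySem.Dict.keys_insert_of_contains _ _ h,
        PySem.Set.add_of_mem ((PySem.Set.contains_iff _ _).mp (by
          rw [PySem.Dict.contains_iff_mem_keys] at h
          exact (PySem.Set.contains_iff _ _).mpr h))]
  · have h' : d.contains k = false := by simpa using h
    rw [PySem.Dict.keys_insert_of_not_contains _ _ h']
    have hm : k ∉ d.keys := by
      intro hm
      exact absurd ((PySem.Dict.contains_iff_mem_keys _ _).mpr hm) (by simp [h'])
    rw [PySem.Set.add_of_not_mem hm]

theorem aInitStep_keys (d : PySem.Dict String Int) (el : List (String × String)) :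
    (aInitStep d el).keys = PySem.Set.update d.keys (el.map (fun p => p.2)) := by
  unfold aInitStep
  exact PySem.Dict.keys_foldl_insert_key el (fun p => p.2) (fun _ _ => 0) d

theorem aCountStep_keys (d : PySem.Dict String Int) (el : List (String × String)) :
    (aCountStep d el).keys
      = PySem.Set.update d.keys ("start" :: "stop" :: el.map (fun p => p.2)) := by
  unfold aCountStep
  rw [PySem.Dict.keys_foldl_insert_key el (fun p => p.2)
        (fun d p => d.getD p.2 0 + 1), keys_insert_add, keys_insert_add,
      PySem.Set.update_cons, PySem.Set.update_cons]

theorem aInit_getD (training : List (List (String × String)))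
    (d : PySem.Dict String Int) (h : ∀ k, d.getD k 0 = 0) (k : String) :
    (training.foldl aInitStep d).getD k 0 = 0 := by
  induction training generalizing d with
  | nil => exact h k
  | cons el rest ih =>
      refine ih (aInitStep d el) (fun k => ?_)
      unfold aInitStep
      induction el generalizing d with
      | nil => exact h k
      | cons p ps ihe =>
          simp only [List.foldl_cons]
          refine ihe (d.insert p.2 0) (fun k => ?_)
          rw [PySem.Dict.getD_insert]
          split <;> [rfl; exact h k]

theorem aInit_keys (training : List (List (String × String)))
    (d : PySem.Dict String Int) :
    (training.foldl aInitStep d).keys = PySem.Set.update d.keys (pvTags training) := by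
  induction training generalizing d with
  | nil => simp [pvTags, PySem.Set.update]
  | cons el rest ih =>
      simp only [List.foldl_cons, ih, aInitStep_keys]
      have : pvTags (el :: rest) = el.map (fun p => p.2) ++ pvTags rest := by
        simp [pvTags]
      rw [this, PySem.Set.update_append]

theorem aCount_keys (training : List (List (String × String)))
    (d : PySem.Dict String Int) :
    (training.foldl aCountStep d).keys
      = PySem.Set.update d.keys
          (training.flatMap (fun el => "start" :: "stop" :: el.map (fun p => p.2))) := by
  induction training generalizing d with
  | nil => simp [PySem.Set.update]
  | cons el rest ih =>
      simp only [List.foldl_cons, ih, aCountStep_keys]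
      rw [List.flatMap_cons, PySem.Set.update_append]

theorem update_of_subset (s : PySem.Set String) (xs : List String)
    (h : ∀ x ∈ xs, x ∈ s) : PySem.Set.update s xs = s := by
  rw [PySem.Set.update_eq_append_filter]
  have hnil : (PySem.Set.ofList xs).filter (fun y => !(PySem.Set.contains s y)) = [] := by
    rw [List.filter_eq_nil_iff]
    intro a ha
    have hm : a ∈ s := h a ((PySem.Set.mem_ofList _ _).mp ha)
    simpa using hm
  rw [hnil, List.append_nil]

theorem foldl_pairs_eq_map (el : List (String × String)) (d : PySem.Dict String Int) :
    el.foldl (fun d p => d.insert p.2 (d.getD p.2 0 + 1)) d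
      = (el.map (fun p => p.2)).foldl (fun d t => d.insert t (d.getD t 0 + 1)) d := by
  induction el generalizing d with
  | nil => rfl
  | cons p ps ih => simp only [List.foldl_cons, List.map_cons, ih]

theorem aCount_getD (training : List (List (String × String)))
    (d : PySem.Dict String Int) (k : String) :
    (training.foldl aCountStep d).getD k 0
      = d.getD k 0 + (if k = "start" then (training.length : Int) else 0)
          + (if k = "stop" then (training.length : Int) else 0)
          + ((pvTags training).count k : Int) := by
  induction training generalizing d with
  | nil => simp [pvTags]
  | cons el rest ih =>
      simp only [List.foldl_cons, ih]
      have hstep : (aCountStep d el).getD k 0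
          = d.getD k 0 + (if k = "start" then 1 else 0) + (if k = "stop" then 1 else 0)
              + ((el.map (fun p => p.2)).count k : Int) := by
        unfold aCountStep
        rw [foldl_pairs_eq_map, PySem.Dict.getD_foldl_insert_add_one,
            PySem.Dict.getD_insert, PySem.Dict.getD_insert, PySem.Dict.getD_insert]
        by_cases h1 : k = "start" <;> by_cases h2 : k = "stop" <;>
          simp_all
      rw [hstep]
      have hc : ((pvTags (el :: rest)).count k : Int)
          = ((el.map (fun p => p.2)).count k : Int) + ((pvTags rest).count k : Int) := by
        simp [pvTags, List.count_append]
      rw [hc]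
      by_cases h1 : k = "start" <;> by_cases h2 : k = "stop" <;> simp_all <;> ring

def aDict (training : List (List (String × String))) : PySem.Dict String Int :=
  training.foldl aCountStep
    (training.foldl aInitStep
      (((PySem.Dict.empty : PySem.Dict String Int).insert "start" 0).insert "stop" 0))

def bDict (training : List (List (String × String))) : PySem.Dict String Int :=
  (PySem.List.dedup (pvTags training)).foldl
    (fun d t => d.insert t (d.getD t 0 + ((pvTags training).count t : Int)))
    (PySem.Dict.ofList [("start", (training.length : Int)), ("stop", (training.length : Int))])

theorem aDict_getD (training : List (List (String × String))) (k : String) :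
    (aDict training).getD k 0
      = (if k = "start" then (training.length : Int) else 0)
          + (if k = "stop" then (training.length : Int) else 0)
          + ((pvTags training).count k : Int) := by
  unfold aDict
  rw [aCount_getD, aInit_getD]
  · ring
  · intro k
    rw [PySem.Dict.getD_insert, PySem.Dict.getD_insert, PySem.Dict.getD_empty]
    split_ifs <;> rfl

-- a fold inserting only keys from l leaves any key outside l untouched
theorem foldl_insert_getD_not_mem (l : List String) (f : PySem.Dict String Int → String → Int)
    (d : PySem.Dict String Int) (k : String) (hk : k ∉ l) :
    (l.foldl (fun d t => d.insert t (f d t)) d).getD k 0 = d.getD k 0 := by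
  induction l generalizing d with
  | nil => rfl
  | cons t ts ih =>
      simp only [List.foldl_cons]
      rw [ih _ (fun h => hk (List.mem_cons_of_mem _ h)), PySem.Dict.getD_insert]
      have : k ≠ t := fun h => hk (h ▸ List.mem_cons_self)
      simp [this]

-- the dedup-then-count fold: each key of a Nodup list is inserted exactly once
theorem foldl_insert_getD_count (l : List String) (c : String → Int)
    (d : PySem.Dict String Int) (k : String) (hnd : l.Nodup) :
    (l.foldl (fun d t => d.insert t (d.getD t 0 + c t)) d).getD k 0
      = d.getD k 0 + (if k ∈ l then c k else 0) := by
  induction l generalizing d with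
  | nil => simp
  | cons t ts ih =>
      simp only [List.foldl_cons]
      rcases List.nodup_cons.mp hnd with ⟨hts, hnd'⟩
      by_cases hk : k = t
      · subst hk
        rw [foldl_insert_getD_not_mem ts _ _ _ hts, PySem.Dict.getD_insert_self]
        simp
      · rw [ih _ hnd', PySem.Dict.getD_insert]
        simp [hk, List.mem_cons]

theorem ofList_pair (n : Int) :
    PySem.Dict.ofList [("start", n), ("stop", n)]
      = PySem.Dict.mk [("start", n), ("stop", n)] := rfl

theorem base_getD (n : Int) (k : String) :
    (PySem.Dict.ofList [("start", n), ("stop", n)]).getD k 0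
      = (if k = "start" then n else 0) + (if k = "stop" then n else 0) := by
  rw [ofList_pair, PySem.Dict.getD_eq_get?_getD, PySem.Dict.get?_mk_cons, PySem.Dict.get?_mk_cons]
  by_cases h1 : "start" = k
  · subst h1; simp
  · by_cases h2 : "stop" = k
    · subst h2; simp [Ne.symm h1]
    · simp [h1, h2, Ne.symm h1, Ne.symm h2, PySem.Dict.get?]

theorem bDict_getD (training : List (List (String × String))) (k : String) :
    (bDict training).getD k 0
      = (if k = "start" then (training.length : Int) else 0)
          + (if k = "stop" then (training.length : Int) else 0)
          + ((pvTags training).count k : Int) := by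
  unfold bDict
  rw [foldl_insert_getD_count _ _ _ _ (by
        rw [PySem.List.dedup_eq_ofList]; exact PySem.Set.nodup_ofList _),
      base_getD]
  by_cases hk : k ∈ pvTags training
  · simp [hk]
  · have : (pvTags training).count k = 0 := List.count_eq_zero.mpr hk
    simp [hk, this]

theorem update_ofList_right (s : PySem.Set String) (xs : List String) :
    PySem.Set.update s (PySem.Set.ofList xs) = PySem.Set.update s xs := by
  rw [PySem.Set.update_eq_append_filter, PySem.Set.update_eq_append_filter,
      PySem.Set.ofList_ofList]

theorem base_keys :
    (((PySem.Dict.empty : PySem.Dict String Int).insert "start" 0).insert "stop" 0).keys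
      = ["start", "stop"] := by decide

theorem aDict_keys (training : List (List (String × String))) :
    (aDict training).keys = PySem.Set.update ["start", "stop"] (pvTags training) := by
  unfold aDict
  rw [aCount_keys, aInit_keys, base_keys]
  apply update_of_subset
  intro x hx
  simp only [List.mem_flatMap, List.mem_cons] at hx
  obtain ⟨el, hel, hx⟩ := hx
  rcases hx with rfl | rfl | hx
  · exact (PySem.Set.mem_update _ _ _).mpr (Or.inl (by simp))
  · exact (PySem.Set.mem_update _ _ _).mpr (Or.inl (by simp))
  · exact (PySem.Set.mem_update _ _ _).mpr (Or.inr (by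
      simp only [pvTags, List.mem_flatMap]; exact ⟨el, hel, hx⟩))

theorem bDict_keys (training : List (List (String × String))) :
    (bDict training).keys = PySem.Set.update ["start", "stop"] (pvTags training) := by
  unfold bDict
  rw [PySem.Dict.keys_foldl_insert, PySem.List.dedup_eq_ofList, update_ofList_right]
  rfl

theorem aDict_nodup (training : List (List (String × String))) :
    (aDict training).keys.Nodup := by
  rw [aDict_keys]
  exact PySem.Set.nodup_update _ _ (by decide)

theorem bDict_nodup (training : List (List (String × String))) :
    (bDict training).keys.Nodup := by
  rw [bDict_keys]
  exact PySem.Set.nodup_update _ _ (by decide)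

-- ===== VERDICT =====
theorem listofpostags_spec : Claim_equal_listofpostags := by
  intro training _
  unfold Spec_listofpostags
  show (aDict training).items = (bDict training).items
  rw [PySem.Dict.items_eq_map_keys _ (aDict_nodup training) 0,
      PySem.Dict.items_eq_map_keys _ (bDict_nodup training) 0,
      aDict_keys, bDict_keys]
  apply List.map_congr_left
  intro k _
  rw [aDict_getD, bDict_getD]
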